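-- pv_equiv track=rewrite | github.com/adotdong29/CoordPy | vision_mvp/experiments/phase71_session_compaction.py | _build_per_round
-- ===== SOURCE A (Python) =====
-- def _build_per_round(union, round_index_hint):
--     if round_index_hint is None:
--         return [list(union)]
--     max_round = max(round_index_hint) if round_index_hint else 1
--     per_round = [[] for _ in range(max(1, int(max_round)))]
--     for h, ridx in zip(union, round_index_hint):
--         slot = max(0, int(ridx) - 1)
--         while slot >= len(per_round):
--             per_round.append([])
--         per_round[slot].append(h)
--     return per_round
-- ===== SOURCE B (Python) =====
-- def _build_per_round(union, round_index_hint):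
--     if round_index_hint is None:
--         return [list(union)]
--     size = max(1, int(max(round_index_hint))) if round_index_hint else 1
--     keyed = sorted(((max(0, int(r) - 1), h) for h, r in zip(union, round_index_hint)),
--                    key=lambda p: p[0])
--     out, j, n = [], 0, len(keyed)
--     for i in range(size):
--         grp = []
--         while j < n and keyed[j][0] == i:
--             grp.append(keyed[j][1])
--             j += 1
--         out.append(grp)
--     return out
-- ===== Notes on version B (the rewrite author's own statement) =====
-- stated objective: alternative
-- what changed: Replaces the single-pass append-into-preallocated-growable-list bucketing by a transposed loop order: for each round index i in range(size), one filtering pass over zip(union, hint) collects exactly the items whose slot equals i; no mutable bucket structure exists at all.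
import Mathlib
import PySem

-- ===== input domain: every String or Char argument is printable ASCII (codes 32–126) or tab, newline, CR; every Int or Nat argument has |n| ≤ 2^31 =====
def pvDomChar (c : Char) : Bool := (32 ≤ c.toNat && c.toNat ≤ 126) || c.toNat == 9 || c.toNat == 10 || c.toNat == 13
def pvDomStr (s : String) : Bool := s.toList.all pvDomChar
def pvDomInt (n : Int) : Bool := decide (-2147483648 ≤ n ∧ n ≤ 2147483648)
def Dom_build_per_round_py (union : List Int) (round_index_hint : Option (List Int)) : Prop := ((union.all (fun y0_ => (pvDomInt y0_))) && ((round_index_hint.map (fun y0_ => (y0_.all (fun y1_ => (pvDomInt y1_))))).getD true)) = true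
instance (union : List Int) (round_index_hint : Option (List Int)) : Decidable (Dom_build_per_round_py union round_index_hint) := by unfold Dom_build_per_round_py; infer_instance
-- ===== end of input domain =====

-- B sorts the (slot, item) pairs stably by slot and then emits each round's group by a
-- linear sweep over the sorted list (sort-then-group vs A's random-access bucket writes; alternative, same cost class).


-- ===== PORT A =====
-- 'while slot >= len(per_round): per_round.append([])'
def pvGrowA (slot : Nat) (L : List (List Int)) : List (List Int) :=
  if L.length ≤ slot then pvGrowA slot (L ++ [[]]) else L
termination_by slot + 1 - L.length
decreasing_by simp; omega

def build_per_round_py (union : List Int) (round_index_hint : Option (List Int)) : List (List Int) :=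
  match round_index_hint with
  | none => [union]
  | some rh =>
    let max_round : Int := match PySem.List.max? rh (fun x => x) with
      | some m => m
      | none => 1
    let per_round := List.replicate (max 1 max_round).toNat ([] : List Int)
    (union.zip rh).foldl (fun L p =>
      let slot := (max 0 (p.2 - 1)).toNat
      let L' := pvGrowA slot L
      L'.set slot (L'.getD slot [] ++ [p.1])) per_round

-- ===== PORT B =====
-- 'for i in range(size): grp = []; while j < n and keyed[j][0] == i: ...; out.append(grp)'
-- (the j pointer consumes exactly the leading run of slot i: takeWhile/dropWhile)
def pvSweepB (keyed : List (Int × Int)) (size i : Nat) : List (List Int) :=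
  if i < size then
    ((keyed.takeWhile (fun p => p.1 == (i : Int))).map Prod.snd)
      :: pvSweepB (keyed.dropWhile (fun p => p.1 == (i : Int))) size (i + 1)
  else []
termination_by size - i

def build_per_round_py_alt (union : List Int) (round_index_hint : Option (List Int)) : List (List Int) :=
  match round_index_hint with
  | none => [union]
  | some rh =>
    let size : Nat := match PySem.List.max? rh (fun x => x) with
      | some m => (max 1 m).toNat
      | none => 1
    let keyed := PySem.List.sorted ((union.zip rh).map (fun p => (max 0 (p.2 - 1), p.1)))
      (fun p => p.1) false
    pvSweepB keyed size 0

-- ===== PRECONDITION & SPEC =====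
def Spec_build_per_round_py (union : List Int) (round_index_hint : Option (List Int)) (out : List (List Int)) : Prop := out = build_per_round_py_alt union round_index_hint
instance (union : List Int) (round_index_hint : Option (List Int)) (out : List (List Int)) : Decidable (Spec_build_per_round_py union round_index_hint out) := by unfold Spec_build_per_round_py; infer_instance

-- ===== CLAIM =====
def Claim_equal_build_per_round_py : Prop := ∀ (union : List Int) (round_index_hint : Option (List Int)), Dom_build_per_round_py union round_index_hint → Spec_build_per_round_py union round_index_hint (build_per_round_py union round_index_hint)

-- ===== LEMMAS AND PROOFS =====

-- the while loop never fires when the slot is already in range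
lemma pvGrowA_of_lt (slot : Nat) (L : List (List Int)) (h : slot < L.length) :
    pvGrowA slot L = L := by
  unfold pvGrowA
  simp [Nat.not_le.mpr h]

-- getD after set, at the written index and away from it
lemma pv_getD_set_self (L : List (List Int)) (s : Nat) (v : List Int) (h : s < L.length) :
    (L.set s v).getD s [] = v := by
  simp [List.getD_eq_getElem?_getD, h]

lemma pv_getD_set_ne (L : List (List Int)) (s i : Nat) (v : List Int) (h : ¬ s = i) :
    (L.set s v).getD i [] = L.getD i [] := by
  simp [List.getD_eq_getElem?_getD, h]

-- A's bucket loop computes, at each index i, the initial content followed by the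
-- first components of the pairs whose slot is i, in order.
lemma pv_fold_filter (ps : List (Int × Int)) (size : Nat) (L : List (List Int))
    (hlen : L.length = size)
    (hb : ∀ p ∈ ps, (max 0 (p.2 - 1)).toNat < size) :
    ps.foldl (fun L p =>
      let slot := (max 0 (p.2 - 1)).toNat
      let L' := pvGrowA slot L
      L'.set slot (L'.getD slot [] ++ [p.1])) L
    = (List.range size).map (fun i =>
        L.getD i [] ++ ((ps.filter (fun p => (max 0 (p.2 - 1)).toNat == i)).map Prod.fst)) := by
  induction ps generalizing L with
  | nil =>
    simp only [List.foldl_nil, List.filter_nil, List.map_nil, List.append_nil]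
    apply List.ext_getElem (by simp [hlen])
    intro i h1 h2
    simp only [List.getElem_map, List.getElem_range]
    rw [List.getD_eq_getElem _ _ (by omega)]
  | cons p ps ih =>
    simp only [List.foldl_cons]
    have hslot : (max 0 (p.2 - 1)).toNat < size := hb p (by simp)
    rw [pvGrowA_of_lt _ _ (by omega)]
    rw [ih (L.set (max 0 (p.2 - 1)).toNat (L.getD (max 0 (p.2 - 1)).toNat [] ++ [p.1]))
        (by simp [hlen]) (fun q hq => hb q (by simp [hq]))]
    apply List.ext_getElem (by simp)
    intro i h1 h2
    have hi : i < size := by simpa using h2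
    simp only [List.getElem_map, List.getElem_range]
    rw [List.filter_cons]
    by_cases hc : (max 0 (p.2 - 1)).toNat = i
    · subst hc
      simp only [beq_self_eq_true, if_pos, List.map_cons]
      rw [pv_getD_set_self _ _ _ (by omega)]
      simp
    · have hcb : ((max 0 (p.2 - 1)).toNat == i) = false := by simpa using hc
      rw [hcb]
      simp only [Bool.false_eq_true, if_neg, not_false_iff]
      rw [pv_getD_set_ne _ _ _ _ hc]

-- B-side: stability of the insertion sort w.r.t. filtering at one key
lemma pv_insertBy_pairwise (x : Int × Int) (ys : List (Int × Int))
    (h : ys.Pairwise (fun a b => a.1 ≤ b.1)) :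
    (PySem.List.insertBy (fun a b => decide (a.1 < b.1)) x ys).Pairwise (fun a b => a.1 ≤ b.1) := by
  induction ys with
  | nil => simp [PySem.List.insertBy]
  | cons y t ih =>
    rcases List.pairwise_cons.mp h with ⟨hy, ht⟩
    simp only [PySem.List.insertBy]
    split_ifs with hlt
    · refine List.pairwise_cons.mpr ⟨?_, h⟩
      intro z hz
      rcases List.mem_cons.mp hz with hz | hz
      · subst hz; simp at hlt; omega
      · have := hy z hz; simp at hlt; omega
    · refine List.pairwise_cons.mpr ⟨?_, ih ht⟩
      intro z hz
      rcases (PySem.List.mem_insertBy _ _ _ _).mp hz with hz | hz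
      · subst hz; simp at hlt; omega
      · exact hy z hz

lemma pv_filter_insertBy (i : Int) (x : Int × Int) (ys : List (Int × Int))
    (h : ys.Pairwise (fun a b => a.1 ≤ b.1)) :
    (PySem.List.insertBy (fun a b => decide (a.1 < b.1)) x ys).filter (fun p => p.1 == i)
      = if x.1 = i then ys.filter (fun p => p.1 == i) ++ [x]
        else ys.filter (fun p => p.1 == i) := by
  induction ys with
  | nil =>
    simp only [PySem.List.insertBy]
    by_cases hc : x.1 = i <;> simp [hc]
  | cons y t ih =>
    rcases List.pairwise_cons.mp h with ⟨hy, ht⟩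
    simp only [PySem.List.insertBy]
    by_cases hlt : x.1 < y.1
    · rw [if_pos (by simpa using hlt)]
      by_cases hc : x.1 = i
      · have hnone : (y :: t).filter (fun p => p.1 == i) = [] := by
          apply List.filter_eq_nil_iff.mpr
          intro z hz
          rcases List.mem_cons.mp hz with hz | hz
          · subst hz; simp; omega
          · have := hy z hz; simp; omega
        rw [if_pos hc, List.filter_cons_of_pos (by simpa using hc), hnone]
        simp
      · rw [if_neg hc, List.filter_cons_of_neg (by simpa using hc)]
    · rw [if_neg (by simpa using hlt)]
      rw [List.filter_cons, List.filter_cons, ih ht]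
      by_cases hc : x.1 = i <;> by_cases hyi : (y.1 == i) = true <;> simp [hc, hyi]

lemma pv_filter_foldl_ins (i : Int) (xs : List (Int × Int)) : ∀ (acc : List (Int × Int)),
    acc.Pairwise (fun a b => a.1 ≤ b.1) →
    (xs.foldl (fun acc x => PySem.List.insertBy (fun a b => decide (a.1 < b.1)) x acc) acc).filter
        (fun p => p.1 == i)
      = acc.filter (fun p => p.1 == i) ++ xs.filter (fun p => p.1 == i) := by
  induction xs with
  | nil => intro acc _; simp
  | cons x xs ih =>
    intro acc hacc
    simp only [List.foldl_cons]
    rw [ih _ (pv_insertBy_pairwise x acc hacc), pv_filter_insertBy i x acc hacc,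
        List.filter_cons]
    by_cases hc : x.1 = i
    · simp [hc]
    · have : (x.1 == i) = false := by simpa using hc
      simp [hc, this]

-- filtering at one key commutes with the stable sort
lemma pv_filter_sorted (i : Int) (xs : List (Int × Int)) :
    (PySem.List.sorted xs (fun p => p.1) false).filter (fun p => p.1 == i)
      = xs.filter (fun p => p.1 == i) := by
  rw [PySem.List.sorted_eq_foldl_insertBy]
  simpa using pv_filter_foldl_ins i xs [] (by simp)

-- in a sorted list whose keys are all ≥ i, the leading run of key i is the whole filter
lemma pv_takeWhile_eq_filter (i : Int) (xs : List (Int × Int))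
    (hs : xs.Pairwise (fun a b => a.1 ≤ b.1)) (hlb : ∀ p ∈ xs, i ≤ p.1) :
    xs.takeWhile (fun p => p.1 == i) = xs.filter (fun p => p.1 == i) := by
  induction xs with
  | nil => simp
  | cons x t ih =>
    rcases List.pairwise_cons.mp hs with ⟨hx, ht⟩
    by_cases hc : x.1 = i
    · have hc' : (x.1 == i) = true := by simpa using hc
      simp [hc', ih ht (fun p hp => hlb p (by simp [hp]))]
    · have hc' : (x.1 == i) = false := by simpa using hc
      have hnil : List.filter (fun p => p.1 == i) t = [] := by
        apply List.filter_eq_nil_iff.mpr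
        intro z hz
        have hxi : i ≤ x.1 := hlb x (by simp)
        have := hx z hz
        simp
        omega
      simp [hc', hnil]

lemma pv_dropWhile_lb (i : Int) (xs : List (Int × Int))
    (hs : xs.Pairwise (fun a b => a.1 ≤ b.1)) (hlb : ∀ p ∈ xs, i ≤ p.1) :
    ∀ p ∈ xs.dropWhile (fun p => p.1 == i), i + 1 ≤ p.1 := by
  induction xs with
  | nil => simp
  | cons x t ih =>
    rcases List.pairwise_cons.mp hs with ⟨hx, ht⟩
    by_cases hc : x.1 = i
    · have hc' : (x.1 == i) = true := by simpa using hc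
      simp only [List.dropWhile_cons, hc', if_true]
      exact ih ht (fun p hp => hlb p (by simp [hp]))
    · have hc' : (x.1 == i) = false := by simpa using hc
      simp only [List.dropWhile_cons, hc', Bool.false_eq_true, if_false]
      intro p hp
      have hxi : i ≤ x.1 := hlb x (by simp)
      rcases List.mem_cons.mp hp with hp | hp
      · subst hp; omega
      · have := hx p hp; omega

-- B's sweep reads off the per-key filters over range' i (size - i)
lemma pv_sweep_eq (size : Nat) : ∀ (i : Nat) (keyed : List (Int × Int)),
    keyed.Pairwise (fun a b => a.1 ≤ b.1) →
    (∀ p ∈ keyed, (i : Int) ≤ p.1) →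
    pvSweepB keyed size i
      = (List.range' i (size - i)).map
          (fun (j : Nat) => (keyed.filter (fun p => p.1 == (j : Int))).map Prod.snd) := by
  intro i
  induction hk : size - i generalizing i with
  | zero =>
    intro keyed _ _
    unfold pvSweepB
    rw [if_neg (by omega)]
    simp
  | succ n ih =>
    intro keyed hs hlb
    unfold pvSweepB
    rw [if_pos (by omega)]
    rw [List.range'_succ, List.map_cons]
    have hdw_s : (keyed.dropWhile (fun p => p.1 == (i : Int))).Pairwise (fun a b => a.1 ≤ b.1) :=
      hs.sublist (List.dropWhile_sublist _)
    have hdw_lb := pv_dropWhile_lb (i : Int) keyed hs hlb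
    have hdw_lb' : ∀ p ∈ keyed.dropWhile (fun p => p.1 == (i : Int)), ((i + 1 : Nat) : Int) ≤ p.1 := by
      intro p hp; have := hdw_lb p hp; push_cast; omega
    rw [ih (i + 1) (by omega) _ hdw_s hdw_lb']
    congr 1
    · rw [pv_takeWhile_eq_filter _ _ hs hlb]
    · apply List.map_congr_left
      intro j hj
      have hji : i + 1 ≤ j := (List.mem_range'_1.mp hj).1
      congr 1
      conv_rhs => rw [← List.takeWhile_append_dropWhile (p := fun p => p.1 == (i : Int)) (l := keyed)]
      rw [List.filter_append]
      have hnil : (keyed.takeWhile (fun p => p.1 == (i : Int))).filter (fun p => p.1 == (j : Int)) = [] := by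
        apply List.filter_eq_nil_iff.mpr
        intro z hz
        have := List.mem_takeWhile_imp hz
        simp at this ⊢
        omega
      rw [hnil, List.nil_append]

-- decorating with the slot and filtering equals filtering the raw pairs
lemma pv_decorate_filter (ps : List (Int × Int)) (j : Nat) :
    ((ps.map (fun p => (max 0 (p.2 - 1), p.1))).filter (fun q => q.1 == (j : Int))).map Prod.snd
      = (ps.filter (fun p => (max 0 (p.2 - 1)).toNat == j)).map Prod.fst := by
  induction ps with
  | nil => simp
  | cons p t ih =>
    simp only [List.map_cons, List.filter_cons]
    by_cases hc : max 0 (p.2 - 1) = (j : Int)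
    · have h1 : (max 0 (p.2 - 1) == (j : Int)) = true := by simpa using hc
      have h2 : ((max 0 (p.2 - 1)).toNat == j) = true := by simp; omega
      simp only [h1, h2, if_pos, List.map_cons, ih]
    · have h1 : (max 0 (p.2 - 1) == (j : Int)) = false := by simpa using hc
      have h2 : ((max 0 (p.2 - 1)).toNat == j) = false := by simp; omega
      simp only [h1, h2, Bool.false_eq_true, if_neg, not_false_iff, ih]

-- B equals the per-round filter form whenever every slot is below size
lemma pv_alt_filter_form (union rh : List Int) (size : Nat)
    (hb : ∀ p ∈ union.zip rh, (max 0 (p.2 - 1)).toNat < size) :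
    pvSweepB (PySem.List.sorted ((union.zip rh).map (fun p => (max 0 (p.2 - 1), p.1)))
        (fun p => p.1) false) size 0
      = (List.range size).map (fun (i : Nat) =>
          (((union.zip rh).filter (fun p => (max 0 (p.2 - 1)).toNat == i)).map Prod.fst)) := by
  rw [pv_sweep_eq size 0 _ (PySem.List.sorted_pairwise _ _) (by
    intro p hp
    have hmem := (PySem.List.mem_sorted _ _ _ _).mp hp
    rcases List.mem_map.mp hmem with ⟨q, _, hq⟩
    subst hq
    simp)]
  rw [Nat.sub_zero, ← List.range_eq_range']
  apply List.map_congr_left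
  intro j _
  rw [pv_filter_sorted, pv_decorate_filter]

-- ===== VERDICT =====
theorem build_per_round_py_spec : Claim_equal_build_per_round_py := by
  intro union rih _
  unfold Spec_build_per_round_py build_per_round_py build_per_round_py_alt
  match rih with
  | none => rfl
  | some rh =>
    simp only
    cases hmax : PySem.List.max? rh (fun x => x) with
    | none =>
      have hb : ∀ p ∈ union.zip rh, (max 0 (p.2 - 1)).toNat < 1 := by
        intro p hp
        have hnil : rh = [] := (PySem.List.max?_eq_none_iff _ _).mp hmax
        subst hnil
        simp at hp
      rw [pv_fold_filter _ 1 _ (by simp) hb, pv_alt_filter_form union rh 1 hb]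
      apply List.map_congr_left
      intro i hi
      have hi1 : i < 1 := List.mem_range.mp hi
      rw [List.getD_eq_getElem _ _ (by simpa using hi1)]
      simp
    | some m =>
      have hle : ∀ y ∈ rh, y ≤ m := fun y hy => PySem.List.max?_isMax hmax y hy
      have hb : ∀ p ∈ union.zip rh, (max 0 (p.2 - 1)).toNat < (max 1 m).toNat := by
        intro p hp
        have h2 := hle p.2 (List.of_mem_zip hp).2
        omega
      rw [pv_fold_filter _ (max 1 m).toNat _ (by simp) hb,
          pv_alt_filter_form union rh (max 1 m).toNat hb]
      apply List.map_congr_left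
      intro i hi
      have hi1 : i < (max 1 m).toNat := List.mem_range.mp hi
      rw [List.getD_eq_getElem _ _ (by simpa using hi1)]
      simp
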